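-- pv_equiv track=rewrite | github.com/Rippko/NAVY | L-systems/main.py | expand_l_system
-- ===== SOURCE A (Python) =====
-- def expand_l_system(axiom, rules, iterations):
--     current = axiom
--
--     for _ in range(iterations):
--         next_gen = ""
--         for char in current:
--             next_gen += rules.get(char, char)
--         current = next_gen
--
--     return current
-- ===== SOURCE B (Python) =====
-- def expand_l_system(axiom, rules, iterations):
--     out = []
--     stack = [(ch, iterations) for ch in reversed(axiom)]
--     while stack:
--         ch, depth = stack.pop()
--         if depth <= 0:
--             out.append(ch)
--         else:
--             for c in reversed(rules.get(ch, ch)):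
--                 stack.append((c, depth - 1))
--     return ''.join(out)
-- ===== Notes on version B (the rewrite author's own statement) =====
-- stated objective: alternative
-- what changed: Replaces A's breadth-first generation-by-generation rewriting loop with a depth-first recursive expansion of each axiom character down to depth `iterations`.
import Mathlib
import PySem

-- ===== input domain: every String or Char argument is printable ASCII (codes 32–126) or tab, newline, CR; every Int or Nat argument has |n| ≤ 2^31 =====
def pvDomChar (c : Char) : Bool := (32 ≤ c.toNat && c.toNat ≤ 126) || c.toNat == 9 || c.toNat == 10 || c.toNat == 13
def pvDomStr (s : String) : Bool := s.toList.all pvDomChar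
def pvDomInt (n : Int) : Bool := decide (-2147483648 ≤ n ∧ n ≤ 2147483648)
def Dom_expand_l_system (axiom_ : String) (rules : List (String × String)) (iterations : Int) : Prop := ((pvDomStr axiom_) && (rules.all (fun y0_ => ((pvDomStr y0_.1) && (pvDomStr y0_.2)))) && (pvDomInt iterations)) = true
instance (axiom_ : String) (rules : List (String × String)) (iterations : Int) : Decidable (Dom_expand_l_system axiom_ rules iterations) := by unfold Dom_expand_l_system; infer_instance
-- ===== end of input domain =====

-- B replaces A's breadth-first generation loop with a depth-first recursive expansion of each character.
-- ===== PORT A =====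
-- rules.get(char, char): first match in the association list, default the char itself (as a list of chars)
def pvRepl (rules : List (String × String)) (c : Char) : List Char :=
  ((rules.find? (fun p => p.1 == String.ofList [c])).map (fun p => p.2) |>.getD (String.ofList [c])).toList

-- inner loop: next_gen = ""; for char in current: next_gen += rules.get(char, char)
def pvStepA (rules : List (String × String)) (current : List Char) : List Char :=
  current.foldl (fun next_gen c => next_gen ++ pvRepl rules c) []

def expand_l_system (axiom_ : String) (rules : List (String × String)) (iterations : Int) : String :=
  String.ofList ((PySem.List.pyRange 0 iterations 1).foldl (fun current _ => pvStepA rules current) axiom_.toList)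

-- ===== PORT B =====
-- termination measure: 1 + the longest rule right-hand side (so every replacement is strictly shorter than pvMx)
def pvMx (rules : List (String × String)) : Nat :=
  rules.foldl (fun m p => max m p.2.toList.length) 1 + 1

lemma pvFoldlMax_ge_init (rules : List (String × String)) (init : Nat) :
    init ≤ rules.foldl (fun m p => max m p.2.toList.length) init := by
  induction rules generalizing init with
  | nil => simp
  | cons p tl ih => exact le_trans (le_max_left _ _) (ih (max init p.2.toList.length))

lemma pvFoldlMax_ge_mem (rules : List (String × String)) (p : String × String)
    (hmem : p ∈ rules) (init : Nat) :
    p.2.toList.length ≤ rules.foldl (fun m q => max m q.2.toList.length) init := by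
  induction rules generalizing init with
  | nil => cases hmem
  | cons q tl ih =>
    rcases List.mem_cons.mp hmem with h | h
    · subst h
      exact le_trans (le_max_right _ _) (pvFoldlMax_ge_init tl _)
    · exact ih h _

lemma pvRepl_length_lt (rules : List (String × String)) (c : Char) :
    (pvRepl rules c).length < pvMx rules := by
  unfold pvRepl pvMx
  cases hf : rules.find? (fun p => p.1 == String.ofList [c]) with
  | none =>
    have h1 := pvFoldlMax_ge_init rules 1
    have h2 : ((Option.map (fun p => p.2) (none : Option (String × String))).getD
        (String.ofList [c])).toList.length = 1 := by simp
    omega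
  | some p =>
    have h := pvFoldlMax_ge_mem rules p (List.mem_of_find?_eq_some hf) 1
    simp only [Option.map_some, Option.getD_some]
    omega

lemma pvMx_pos (rules : List (String × String)) : 0 < pvMx rules := by
  unfold pvMx; omega

lemma pvSumRepl_lt (rules : List (String × String)) (ch : Char) (depth : Int)
    (h : ¬ depth ≤ 0) :
    ((((pvRepl rules ch).map (fun c => (c, depth - 1))).map
        (fun p => pvMx rules ^ p.2.toNat)).sum) < pvMx rules ^ depth.toNat := by
  have hlen : ∀ (l : List Char) (k : Nat),
      ((l.map (fun c => (c, depth - 1))).map (fun p => k ^ p.2.toNat)).sum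
        = l.length * k ^ (depth - 1).toNat := by
    intro l k
    induction l with
    | nil => simp
    | cons a tl ih =>
      simp only [List.map_cons, List.sum_cons, ih, List.length_cons]
      ring
  rw [hlen]
  have h3 : depth.toNat = (depth - 1).toNat + 1 := by omega
  rw [h3, pow_succ, Nat.mul_comm (pvRepl rules ch).length]
  exact (Nat.mul_lt_mul_left (Nat.pow_pos (pvMx_pos rules))).mpr (pvRepl_length_lt rules ch)

-- the while loop over the explicit stack; Python pushes reversed(repl) and pops from the end,
-- which processes repl left to right: here the stack is a front list and repl is prepended in order
def pvRunB (rules : List (String × String)) (out : List Char) : List (Char × Int) → List Char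
  | [] => out
  | (ch, depth) :: stack =>
    if depth ≤ 0 then pvRunB rules (out ++ [ch]) stack
    else pvRunB rules out (((pvRepl rules ch).map (fun c => (c, depth - 1))) ++ stack)
termination_by stack => (stack.map (fun p => pvMx rules ^ p.2.toNat)).sum
decreasing_by
  · have := Nat.pow_pos (pvMx_pos rules) (n := depth.toNat)
    simp; omega
  · have := pvSumRepl_lt rules ch depth (by assumption)
    simp only [List.map_append, List.sum_append, List.map_cons, List.sum_cons]
    omega

def expand_l_system_alt (axiom_ : String) (rules : List (String × String)) (iterations : Int) : String :=
  String.ofList (pvRunB rules [] (axiom_.toList.map (fun ch => (ch, iterations))))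

-- ===== PRECONDITION & SPEC =====
def Spec_expand_l_system (axiom_ : String) (rules : List (String × String)) (iterations : Int) (out : String) : Prop := out = expand_l_system_alt axiom_ rules iterations
instance (axiom_ : String) (rules : List (String × String)) (iterations : Int) (out : String) : Decidable (Spec_expand_l_system axiom_ rules iterations out) := by unfold Spec_expand_l_system; infer_instance

-- ===== CLAIM (what is proved, stated in full; the proofs are below) =====
def Claim_equal_expand_l_system : Prop := ∀ (axiom_ : String) (rules : List (String × String)) (iterations : Int), Dom_expand_l_system axiom_ rules iterations → Spec_expand_l_system axiom_ rules iterations (expand_l_system axiom_ rules iterations)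

-- ===== LEMMAS AND PROOFS =====

-- mathematical description of depth-first expansion, used to relate both ports
def pvExpandChar (rules : List (String × String)) (c : Char) : Nat → List Char
  | 0 => [c]
  | d + 1 => (pvRepl rules c).flatMap (fun c' => pvExpandChar rules c' d)

lemma pvStepA_eq_flatMap (rules : List (String × String)) (cs : List Char) :
    pvStepA rules cs = cs.flatMap (pvRepl rules) := by
  have h : ∀ (cs : List Char) (acc : List Char),
      cs.foldl (fun next_gen c => next_gen ++ pvRepl rules c) acc = acc ++ cs.flatMap (pvRepl rules) := by
    intro cs
    induction cs with
    | nil => simp [List.foldl]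
    | cons c tl ih => intro acc; simp [List.foldl, ih, List.flatMap_cons]
  simpa [pvStepA, List.flatMap] using h cs []

lemma pvIter_eq_flatMap (rules : List (String × String)) (cs : List Char) (n : Nat) :
    (pvStepA rules)^[n] cs = cs.flatMap (fun c => pvExpandChar rules c n) := by
  induction n generalizing cs with
  | zero => simp [pvExpandChar]
  | succ d ih =>
    rw [Function.iterate_succ_apply, ih, pvStepA_eq_flatMap, List.flatMap_assoc]
    simp [pvExpandChar]

lemma pvFoldl_pyRange_iterate (g : List Char → List Char) (n : Int) (init : List Char) :
    (PySem.List.pyRange 0 n 1).foldl (fun cur _ => g cur) init = g^[n.toNat] init := by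
  have h : ∀ (l : List Int) (init : List Char),
      l.foldl (fun cur _ => g cur) init = g^[l.length] init := by
    intro l
    induction l with
    | nil => simp
    | cons x tl ih => intro init; simp [List.foldl, ih, Function.iterate_succ_apply]
  rw [h]
  congr 1
  rw [PySem.List.length_pyRange_one]
  omega

lemma pvRunB_eq (rules : List (String × String)) (out : List Char) (stack : List (Char × Int)) :
    pvRunB rules out stack = out ++ stack.flatMap (fun p => pvExpandChar rules p.1 p.2.toNat) := by
  fun_induction pvRunB rules out stack with
  | case1 out => simp
  | case2 out ch depth stack hle ih =>
    have : depth.toNat = 0 := by omega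
    simp [ih, this, pvExpandChar]
  | case3 out ch depth stack hle ih =>
    have h3 : depth.toNat = (depth - 1).toNat + 1 := by omega
    rw [ih]
    simp only [List.flatMap_append, List.flatMap_map, List.flatMap_cons]
    rw [h3]
    simp [pvExpandChar]

-- ===== VERDICT (by name: the statement is the Claim_ definition above) =====
theorem expand_l_system_spec : Claim_equal_expand_l_system := by
  intro axiom_ rules iterations _
  unfold Spec_expand_l_system expand_l_system expand_l_system_alt
  rw [pvFoldl_pyRange_iterate, pvIter_eq_flatMap, pvRunB_eq]
  simp [List.flatMap_map]
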